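-- pv_equiv track=rewrite | github.com/FrederickWilhelmChen/world-game | backend/crawler/usgs_minerals.py | _select_year_column
-- ===== SOURCE A (Python) =====
-- def _select_year_column(columns):
--     candidates = []
--     for column in columns:
--         try:
--             year = int(str(column).strip())
--         except ValueError:
--             continue
--         candidates.append((column, year))
--     if not candidates:
--         return None, None
--     return max(candidates, key=lambda item: item[1])
-- ===== SOURCE B (Python) =====
-- def _select_year_column(columns):
--     best_column = None
--     best_year = None
--     for column in columns:
--         try:
--             year = int(str(column).strip())
--         except ValueError:
--             continue
--         if best_year is None or year > best_year:
--             best_column, best_year = column, year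
--     return best_column, best_year
-- ===== Notes on version B (the rewrite author's own statement) =====
-- stated objective: simpler
-- what changed: Replaces the collect-candidates-into-a-list-then-max pass with a single-pass running best (best_column, best_year), using strict > so the first maximal column wins exactly as max() does.
import Mathlib
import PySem

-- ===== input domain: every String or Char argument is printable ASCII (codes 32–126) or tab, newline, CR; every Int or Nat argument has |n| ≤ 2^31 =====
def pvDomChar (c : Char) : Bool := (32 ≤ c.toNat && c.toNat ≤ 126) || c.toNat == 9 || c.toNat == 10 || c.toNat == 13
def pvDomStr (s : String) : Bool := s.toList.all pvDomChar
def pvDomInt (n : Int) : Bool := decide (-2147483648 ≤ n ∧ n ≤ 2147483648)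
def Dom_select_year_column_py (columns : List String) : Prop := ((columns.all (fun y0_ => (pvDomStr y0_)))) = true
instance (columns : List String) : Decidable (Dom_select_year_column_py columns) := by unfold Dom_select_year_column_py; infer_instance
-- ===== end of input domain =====

-- B replaces A's collect-all-candidates-then-max with a single running best pair (simpler, O(1) extra space).

-- ===== PORT A =====
def select_year_column_py (columns : List String) : Option String × Option Int :=
  let candidates : List (String × Int) :=
    columns.foldl (fun acc column =>
      match PySem.Int.ofStr? (PySem.Str.strip column) with
      | none => acc
      | some year => acc ++ [(column, year)]) []
  match PySem.List.max? candidates (fun item => item.2) with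
  | none => (none, none)
  | some (c, y) => (some c, some y)

-- ===== PORT B =====
def select_year_column_py_alt (columns : List String) : Option String × Option Int :=
  columns.foldl (fun best column =>
    match PySem.Int.ofStr? (PySem.Str.strip column) with
    | none => best
    | some year =>
      match best.2 with
      | none => (some column, some year)
      | some b => if b < year then (some column, some year) else best) (none, none)

-- ===== PRECONDITION & SPEC =====
def Spec_select_year_column_py (columns : List String) (out : Option String × Option Int) : Prop := out = select_year_column_py_alt columns
instance (columns : List String) (out : Option String × Option Int) : Decidable (Spec_select_year_column_py columns out) := by unfold Spec_select_year_column_py; infer_instance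

-- ===== CLAIM (what is proved, stated in full; the proofs are below) =====
def Claim_equal_select_year_column_py : Prop := ∀ (columns : List String), Dom_select_year_column_py columns → Spec_select_year_column_py columns (select_year_column_py columns)

-- ===== LEMMAS AND PROOFS =====

/-- Convert a candidate list to B's running state: the first maximal pair (by year). -/
def pvConv (cs : List (String × Int)) : Option String × Option Int :=
  match PySem.List.max? cs (fun item => item.2) with
  | none => (none, none)
  | some (c, y) => (some c, some y)

theorem pvMax_append (cs : List (String × Int)) (p : String × Int) :
    PySem.List.max? (cs ++ [p]) (fun item => item.2) =
      match PySem.List.max? cs (fun item => item.2) with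
      | none => some p
      | some m => if m.2 < p.2 then some p else some m := by
  cases h : PySem.List.max? cs (fun item => item.2) with
  | none =>
    unfold PySem.List.max? at h ⊢
    rw [List.foldl_append, h]
    simp
  | some m =>
    unfold PySem.List.max? at h ⊢
    rw [List.foldl_append, h]
    simp

theorem pvInvariant (columns : List String) (acc : List (String × Int)) :
    pvConv (columns.foldl (fun acc column =>
      match PySem.Int.ofStr? (PySem.Str.strip column) with
      | none => acc
      | some year => acc ++ [(column, year)]) acc)
    = columns.foldl (fun best column =>
      match PySem.Int.ofStr? (PySem.Str.strip column) with
      | none => best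
      | some year =>
        match best.2 with
        | none => (some column, some year)
        | some b => if b < year then (some column, some year) else best) (pvConv acc) := by
  induction columns generalizing acc with
  | nil => simp
  | cons c rest ih =>
    simp only [List.foldl_cons]
    cases hp : PySem.Int.ofStr? (PySem.Str.strip c) with
    | none => exact ih acc
    | some y =>
      rw [ih (acc ++ [(c, y)])]
      have hstep : pvConv (acc ++ [(c, y)]) =
          (match (pvConv acc).2 with
           | none => (some c, some y)
           | some b => if b < y then (some c, some y) else pvConv acc) := by
        unfold pvConv
        rw [pvMax_append]
        cases hm : PySem.List.max? acc (fun item => item.2) with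
        | none => simp
        | some m =>
          cases m with
          | mk mc my =>
            by_cases hlt : my < y <;> simp [hlt]
      rw [hstep]

-- ===== VERDICT (by name: the statement is the Claim_ definition above) =====
theorem select_year_column_py_spec : Claim_equal_select_year_column_py := by
  intro columns _
  have h := pvInvariant columns []
  exact h
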